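-- pv_equiv track=rewrite | github.com/astronomer/astro-apply | astro_apply/client.py | get_users_to_update_for_workspace
-- ===== SOURCE A (Python) =====
-- from typing import Any, Dict, List, Set, Tuple
--
-- def get_users_to_update_for_workspace(
--     config_users_and_roles: Dict[str, str], existing_users_and_roles: Any
-- ) -> Tuple[Dict[str, str], Dict[str, str], Set[str], Set[str]]:
--     """
--     :param config_users_and_roles:
--     :param existing_users_and_roles:
--     :return:
--     """
--     users_to_add = {
--         user: config_users_and_roles[user] for user in set(config_users_and_roles).difference(existing_users_and_roles)
--     }
--
--     users_in_both = set(config_users_and_roles).intersection(existing_users_and_roles)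
--     users_to_delete = set(existing_users_and_roles).difference(config_users_and_roles)
--     users_to_update = {
--         user: role
--         for user, role in config_users_and_roles.items()
--         if user in existing_users_and_roles and existing_users_and_roles.get(user) != role
--     }
--
--     return users_to_update, users_to_add, users_to_delete, users_in_both
-- ===== SOURCE B (Python) =====
-- from typing import Any, Dict, List, Set, Tuple
--
--
-- def get_users_to_update_for_workspace(
--     config_users_and_roles: Dict[str, str], existing_users_and_roles: Any
-- ) -> Tuple[Dict[str, str], Dict[str, str], Set[str], Set[str]]:
--     users_to_update: Dict[str, str] = {}
--     users_to_add: Dict[str, str] = {}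
--     users_in_both: Set[str] = set()
--     for user, role in config_users_and_roles.items():
--         if user in existing_users_and_roles:
--             users_in_both.add(user)
--             if existing_users_and_roles.get(user) != role:
--                 users_to_update[user] = role
--         else:
--             users_to_add[user] = role
--     users_to_delete = {user for user in existing_users_and_roles if user not in config_users_and_roles}
--     return users_to_update, users_to_add, users_to_delete, users_in_both
-- ===== Notes on version B (the rewrite author's own statement) =====
-- stated objective: alternative
-- what changed: A's four independent set/dict comprehensions (two set differences, one intersection, one filtered dict comprehension) are replaced by a single classifying loop over config items that routes each user into add/update/in-both, plus one pass over existing keys for deletions.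
import Mathlib
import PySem

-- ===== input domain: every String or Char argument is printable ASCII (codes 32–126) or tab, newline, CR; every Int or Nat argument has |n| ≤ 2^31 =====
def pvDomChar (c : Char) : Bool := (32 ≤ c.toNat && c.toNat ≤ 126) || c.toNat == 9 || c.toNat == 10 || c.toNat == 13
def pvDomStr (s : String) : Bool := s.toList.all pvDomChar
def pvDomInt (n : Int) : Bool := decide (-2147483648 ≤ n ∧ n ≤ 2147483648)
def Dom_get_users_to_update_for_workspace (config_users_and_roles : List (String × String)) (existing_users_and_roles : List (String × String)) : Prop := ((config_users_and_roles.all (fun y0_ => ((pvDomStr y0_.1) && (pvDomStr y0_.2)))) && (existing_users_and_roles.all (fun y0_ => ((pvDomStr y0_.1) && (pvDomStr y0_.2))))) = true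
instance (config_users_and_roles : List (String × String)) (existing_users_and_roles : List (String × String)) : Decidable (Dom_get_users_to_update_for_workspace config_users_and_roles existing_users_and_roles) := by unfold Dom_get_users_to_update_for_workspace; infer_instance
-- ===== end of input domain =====

-- B replaces A's four independent set/dict comprehensions by ONE classifying pass over the
-- config items (add / update / in-both decided per item) plus one pass over the existing keys
-- for the deletions; same return value (objective: alternative decomposition, same asymptotic cost).
-- Dict outputs are association lists; set outputs are PySem.Set lists (compared as sets/dicts,
-- i.e. ignoring Python's hash iteration order, which PySem does not model).

-- ===== PORT A =====
def get_users_to_update_for_workspace (config_users_and_roles : List (String × String)) (existing_users_and_roles : List (String × String)) : (List (String × String)) × (List (String × String)) × List String × List String :=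
  let d1 : PySem.Dict String String := PySem.Dict.ofList config_users_and_roles
  let d2 : PySem.Dict String String := PySem.Dict.ofList existing_users_and_roles
  -- {user: config[user] for user in set(config).difference(existing)}
  let users_to_add := (PySem.Set.diff (PySem.Set.ofList d1.keys) d2.keys).map (fun u => (u, d1.getD u ""))
  -- set(config).intersection(existing)
  let users_in_both := PySem.Set.inter (PySem.Set.ofList d1.keys) d2.keys
  -- set(existing).difference(config)
  let users_to_delete := PySem.Set.diff (PySem.Set.ofList d2.keys) d1.keys
  -- {user: role for user, role in config.items() if user in existing and existing.get(user) != role}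
  let users_to_update := d1.items.filter (fun p => d2.contains p.1 && !(d2.get? p.1 == some p.2))
  (users_to_update, users_to_add, users_to_delete, users_in_both)

-- ===== PORT B =====
-- loop body of B's single classifying pass (helper)
def pvStepB (d2 : PySem.Dict String String)
    (st : PySem.Dict String String × PySem.Dict String String × PySem.Set String)
    (p : String × String) : PySem.Dict String String × PySem.Dict String String × PySem.Set String :=
  if d2.contains p.1 then
    let both := PySem.Set.add st.2.2 p.1
    if !(d2.get? p.1 == some p.2) then (st.1.insert p.1 p.2, st.2.1, both)
    else (st.1, st.2.1, both)
  else (st.1, st.2.1.insert p.1 p.2, st.2.2)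

def get_users_to_update_for_workspace_alt (config_users_and_roles : List (String × String)) (existing_users_and_roles : List (String × String)) : (List (String × String)) × (List (String × String)) × List String × List String :=
  let d1 : PySem.Dict String String := PySem.Dict.ofList config_users_and_roles
  let d2 : PySem.Dict String String := PySem.Dict.ofList existing_users_and_roles
  -- for user, role in config.items(): classify into update / add / in-both
  let st := d1.items.foldl (pvStepB d2) (PySem.Dict.empty, PySem.Dict.empty, PySem.Set.empty)
  -- {user for user in existing if user not in config}
  let users_to_delete := PySem.Set.ofList (d2.keys.filter (fun u => !(d1.contains u)))
  (st.1.items, st.2.1.items, users_to_delete, st.2.2)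

-- ===== PRECONDITION & SPEC =====
def Spec_get_users_to_update_for_workspace (config_users_and_roles : List (String × String)) (existing_users_and_roles : List (String × String)) (out : (List (String × String)) × (List (String × String)) × List String × List String) : Prop := out = get_users_to_update_for_workspace_alt config_users_and_roles existing_users_and_roles
instance (config_users_and_roles : List (String × String)) (existing_users_and_roles : List (String × String)) (out : (List (String × String)) × (List (String × String)) × List String × List String) : Decidable (Spec_get_users_to_update_for_workspace config_users_and_roles existing_users_and_roles out) := by unfold Spec_get_users_to_update_for_workspace; infer_instance

-- ===== CLAIM (what is proved, stated in full; the proofs are below) =====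
def Claim_equal_get_users_to_update_for_workspace : Prop := ∀ (config_users_and_roles : List (String × String)) (existing_users_and_roles : List (String × String)), Dom_get_users_to_update_for_workspace config_users_and_roles existing_users_and_roles → Spec_get_users_to_update_for_workspace config_users_and_roles existing_users_and_roles (get_users_to_update_for_workspace config_users_and_roles existing_users_and_roles)

-- ===== LEMMAS AND PROOFS =====

-- B's single classifying fold, characterised: starting from accumulators whose keys/elements are
-- disjoint from the (nodup) keys of the remaining items, it appends exactly the three filters.
theorem pv_loop_spec (d2 : PySem.Dict String String)
    (l : List (String × String)) (upd add : PySem.Dict String String) (both : List String)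
    (hnd : (l.map Prod.fst).Nodup)
    (hupd : ∀ p ∈ l, upd.contains p.1 = false)
    (hadd : ∀ p ∈ l, add.contains p.1 = false)
    (hboth : ∀ p ∈ l, p.1 ∉ both) :
    l.foldl (pvStepB d2) (upd, add, both)
    = (PySem.Dict.mk (upd.items ++ l.filter (fun p => d2.contains p.1 && !(d2.get? p.1 == some p.2))),
       PySem.Dict.mk (add.items ++ l.filter (fun p => !(d2.contains p.1))),
       both ++ (l.map Prod.fst).filter (fun u => d2.contains u)) := by
  induction l generalizing upd add both with
  | nil => simp
  | cons p l ih =>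
    have hnd' := List.nodup_cons.mp (show (p.1 :: l.map Prod.fst).Nodup by simpa using hnd)
    have hpnot : p.1 ∉ l.map Prod.fst := hnd'.1
    have hndl : (l.map Prod.fst).Nodup := hnd'.2
    rw [List.foldl_cons]
    by_cases hc : d2.contains p.1 = true
    · have hbothp : PySem.Set.add both p.1 = both ++ [p.1] :=
        PySem.Set.add_of_not_mem (hboth p (by simp))
      by_cases hg : (d2.get? p.1 == some p.2) = true
      · -- in both, role unchanged: only `both` grows
        have hstep : pvStepB d2 (upd, add, both) p = (upd, add, both ++ [p.1]) := by
          simp [pvStepB, hc, hg, hbothp]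
        rw [hstep, ih upd add (both ++ [p.1]) hndl
            (fun q hq => hupd q (by simp [hq]))
            (fun q hq => hadd q (by simp [hq]))
            (fun q hq => by
              have := hboth q (by simp [hq])
              have hne : q.1 ≠ p.1 := fun h => hpnot (h ▸ List.mem_map_of_mem hq)
              simp [this, hne])]
        simp [hc, hg]
      · -- in both, role changed: `upd` and `both` grow
        have hitems : (upd.insert p.1 p.2).items = upd.items ++ [(p.1, p.2)] :=
          PySem.Dict.items_insert_of_not_contains upd p.2 (hupd p (by simp))
        have hstep : pvStepB d2 (upd, add, both) p
            = (upd.insert p.1 p.2, add, both ++ [p.1]) := by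
          simp [pvStepB, hc, hg, hbothp]
        rw [hstep, ih (upd.insert p.1 p.2) add (both ++ [p.1]) hndl
            (fun q hq => by
              have hne : q.1 ≠ p.1 := fun h => hpnot (h ▸ List.mem_map_of_mem hq)
              simp [PySem.Dict.contains_insert, hne, hupd q (by simp [hq])])
            (fun q hq => hadd q (by simp [hq]))
            (fun q hq => by
              have := hboth q (by simp [hq])
              have hne : q.1 ≠ p.1 := fun h => hpnot (h ▸ List.mem_map_of_mem hq)
              simp [this, hne])]
        simp [hc, hg, hitems]
    · -- not in existing: `add` grows
      have hc' : d2.contains p.1 = false := by simpa using hc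
      have hitems : (add.insert p.1 p.2).items = add.items ++ [(p.1, p.2)] :=
        PySem.Dict.items_insert_of_not_contains add p.2 (hadd p (by simp))
      have hstep : pvStepB d2 (upd, add, both) p = (upd, add.insert p.1 p.2, both) := by
        simp [pvStepB, hc']
      rw [hstep, ih upd (add.insert p.1 p.2) both hndl
          (fun q hq => hupd q (by simp [hq]))
          (fun q hq => by
            have hne : q.1 ≠ p.1 := fun h => hpnot (h ▸ List.mem_map_of_mem hq)
            simp [PySem.Dict.contains_insert, hne, hadd q (by simp [hq])])
          (fun q hq => hboth q (by simp [hq]))]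
      simp [hc', hitems]

-- A's users_to_add, rebuilt from the filtered items list (keys nodup).
theorem pv_add_eq (d1 : PySem.Dict String String) (q : String → Bool)
    (sub : List (String × String)) (hsub : ∀ p ∈ sub, p ∈ d1.items)
    (hnd : d1.keys.Nodup) :
    ((sub.map Prod.fst).filter q).map (fun u => (u, d1.getD u ""))
      = sub.filter (fun p => q p.1) := by
  induction sub with
  | nil => simp
  | cons p l ih =>
    have hval : d1.getD p.1 "" = p.2 :=
      PySem.Dict.getD_of_mem_items _ (hsub p (by simp)) hnd ""
    by_cases hq : q p.1 = true
    · simp [hq, hval, ih (fun r hr => hsub r (by simp [hr]))]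
    · simp [hq, ih (fun r hr => hsub r (by simp [hr]))]

-- ===== VERDICT (by name: the statement is the Claim_ definition above) =====
theorem get_users_to_update_for_workspace_spec : Claim_equal_get_users_to_update_for_workspace := by
  intro config existing _
  show _ = _
  unfold get_users_to_update_for_workspace get_users_to_update_for_workspace_alt
  dsimp only
  set d1 : PySem.Dict String String := PySem.Dict.ofList config with hd1
  set d2 : PySem.Dict String String := PySem.Dict.ofList existing with hd2
  have hnd1 : d1.keys.Nodup := PySem.Dict.nodup_keys_ofList config
  have hnd2 : d2.keys.Nodup := PySem.Dict.nodup_keys_ofList existing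
  have hndi : (d1.items.map Prod.fst).Nodup := hnd1
  rw [pv_loop_spec d2 d1.items PySem.Dict.empty PySem.Dict.empty PySem.Set.empty hndi
      (fun _ _ => by simp) (fun _ _ => by simp)
      (fun _ _ h => by simp [PySem.Set.empty] at h)]
  refine Prod.ext ?_ (Prod.ext ?_ (Prod.ext ?_ ?_))
  · -- users_to_update
    simp [PySem.Dict.empty]
  · -- users_to_add
    show (PySem.Set.diff (PySem.Set.ofList d1.keys) d2.keys).map (fun u => (u, d1.getD u ""))
        = PySem.Dict.empty.items ++ d1.items.filter (fun p => !(d2.contains p.1))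
    rw [PySem.Set.ofList_eq_self_of_nodup _ hnd1]
    have hdiff : PySem.Set.diff d1.keys d2.keys
        = d1.keys.filter (fun u => !(d2.contains u)) := by
      simp [PySem.Set.diff, PySem.Dict.contains_eq_decide_mem_keys]
    rw [hdiff]
    have : d1.keys = d1.items.map Prod.fst := rfl
    rw [this, pv_add_eq d1 (fun u => !(d2.contains u)) d1.items (fun _ h => h) hnd1]
    simp [PySem.Dict.empty]
  · -- users_to_delete
    show PySem.Set.diff (PySem.Set.ofList d2.keys) d1.keys
        = PySem.Set.ofList (d2.keys.filter (fun u => !(d1.contains u)))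
    rw [PySem.Set.ofList_eq_self_of_nodup _ hnd2]
    have hdiff : PySem.Set.diff d2.keys d1.keys
        = d2.keys.filter (fun u => !(d1.contains u)) := by
      simp [PySem.Set.diff, PySem.Dict.contains_eq_decide_mem_keys]
    rw [hdiff, PySem.Set.ofList_eq_self_of_nodup _ (hnd2.filter _)]
  · -- users_in_both
    show PySem.Set.inter (PySem.Set.ofList d1.keys) d2.keys
        = PySem.Set.empty ++ (d1.items.map Prod.fst).filter (fun u => d2.contains u)
    rw [PySem.Set.ofList_eq_self_of_nodup _ hnd1]
    have : d1.keys = d1.items.map Prod.fst := rfl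
    simp [PySem.Set.inter, PySem.Set.empty, PySem.Dict.contains_eq_decide_mem_keys, this]
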